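-- pv_equiv track=rewrite | github.com/full-chaos/dev-health-ops | src/dev_health_ops/core/taxonomy.py | split_category_filters
-- ===== SOURCE A (Python) =====
-- def split_category_filters(
--     work_category: list[str | None] | None,
-- ) -> tuple[list[str], list[str]]:
--     """Split work category filter values into (themes, subcategories).
--
--     A value with a dot (e.g. "feature_delivery.customer") is treated as a
--     subcategory; its theme prefix is also added to the themes list.
--     A value without a dot is treated as a theme only.
--
--     Args:
--         work_category: List of raw category strings, possibly containing None.
--
--     Returns:
--         (themes, subcategories) — both deduplicated and ordered by first appearance.
--     """
--     themes: list[str] = []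
--     subcategories: list[str] = []
--     for category in work_category or []:
--         if not category:
--             continue
--         category_str = str(category).strip()
--         if not category_str:
--             continue
--         if "." in category_str:
--             subcategories.append(category_str)
--             themes.append(category_str.split(".", 1)[0])
--         else:
--             themes.append(category_str)
--     return list(dict.fromkeys(themes)), list(dict.fromkeys(subcategories))
-- ===== SOURCE B (Python) =====
-- def split_category_filters(
--     work_category,
-- ):
--     """Split work category filter values into (themes, subcategories).
--
--     Walks the list back-to-front; dedup-by-first-appearance is achieved
--     structurally by prepending each entry's contributions and removing any
--     later duplicate already in the accumulator (no dict/set needed).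
--     """
--     themes, subcategories = [], []
--     for category in reversed(list(work_category or [])):
--         s = category.strip() if category else ""
--         if not s:
--             continue
--         if "." in s:
--             t = s.split(".", 1)[0]
--             themes = [t] + [x for x in themes if x != t]
--             subcategories = [s] + [x for x in subcategories if x != s]
--         else:
--             themes = [s] + [x for x in themes if x != s]
--     return themes, subcategories
-- ===== Notes on version B (the rewrite author's own statement) =====
-- stated objective: alternative
-- what changed: Replaces the forward two-accumulator loop plus dict.fromkeys dedup passes by a reverse (back-to-front) traversal in which dedup-by-first-appearance happens structurally: each entry is prepended and any duplicate already accumulated from later positions is filtered out, so no dict/seen structure exists.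
import Mathlib
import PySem

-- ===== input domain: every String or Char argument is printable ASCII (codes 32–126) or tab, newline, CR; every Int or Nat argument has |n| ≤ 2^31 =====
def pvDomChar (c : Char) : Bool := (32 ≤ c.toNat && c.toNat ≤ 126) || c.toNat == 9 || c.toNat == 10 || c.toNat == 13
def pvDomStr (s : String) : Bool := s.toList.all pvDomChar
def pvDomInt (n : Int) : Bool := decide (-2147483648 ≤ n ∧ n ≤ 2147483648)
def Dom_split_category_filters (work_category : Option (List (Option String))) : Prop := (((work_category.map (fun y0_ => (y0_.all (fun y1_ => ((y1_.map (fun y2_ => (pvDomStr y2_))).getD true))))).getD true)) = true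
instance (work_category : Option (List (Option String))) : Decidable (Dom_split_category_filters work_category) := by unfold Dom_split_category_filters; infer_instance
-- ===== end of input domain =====

-- B replaces A's forward loop + dict.fromkeys dedup by a reverse traversal that
-- dedups structurally (prepend and filter out later duplicates); alternative, same results.


-- ===== PORT A =====
-- category_str.split(".", 1)[0]: split with sep "." is always `some` of a nonempty
-- list, so .getD [] / .headD "" only name unreachable defaults (exact on all inputs).
def pvSplitHead (s : String) : String := ((PySem.Str.splitMax? s "." 1).getD []).headD ""

def split_category_filters (work_category : Option (List (Option String))) : List String × List String :=
  -- `for category in work_category or []` with the loop body, state = (themes, subcategories)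
  let st :=
    (work_category.getD []).foldl
      (fun (st : List String × List String) category =>
        match category with
        | none => st                                     -- `if not category: continue` (None)
        | some c =>
          if c = "" then st                              -- `if not category: continue` ("")
          else
            let category_str := PySem.Str.strip c
            if category_str = "" then st                 -- `if not category_str: continue`
            else if PySem.Str.isIn "." category_str then
              (st.1 ++ [pvSplitHead category_str], st.2 ++ [category_str])
            else
              (st.1 ++ [category_str], st.2))
      ([], [])
  (PySem.List.dedup st.1, PySem.List.dedup st.2)

-- ===== PORT B =====
def split_category_filters_alt (work_category : Option (List (Option String))) : List String × List String :=
  -- `for category in reversed(list(work_category or []))`, state = (themes, subcategories)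
  (work_category.getD []).reverse.foldl
    (fun (st : List String × List String) category =>
      -- s = category.strip() if category else ""
      let s := match category with
               | none => ""
               | some c => if c = "" then "" else PySem.Str.strip c
      if s = "" then st                                  -- `if not s: continue`
      else if PySem.Str.isIn "." s then
        let t := pvSplitHead s
        (t :: st.1.filter (fun x => x != t), s :: st.2.filter (fun x => x != s))
      else
        (s :: st.1.filter (fun x => x != s), st.2))
    ([], [])

-- ===== PRECONDITION & SPEC =====
def Spec_split_category_filters (work_category : Option (List (Option String))) (out : List String × List String) : Prop := out = split_category_filters_alt work_category
instance (work_category : Option (List (Option String))) (out : List String × List String) : Decidable (Spec_split_category_filters work_category out) := by unfold Spec_split_category_filters; infer_instance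

-- ===== CLAIM (what is proved, stated in full; the proofs are below) =====
def Claim_equal_split_category_filters : Prop := ∀ (work_category : Option (List (Option String))), Dom_split_category_filters work_category → Spec_split_category_filters work_category (split_category_filters work_category)

-- ===== LEMMAS AND PROOFS =====

-- one element of A's cleaning: None / "" / whitespace-only entries give none
def pvCleanOne (category : Option String) : Option String :=
  match category with
  | none => none
  | some c =>
    if c = "" then none
    else
      let s := PySem.Str.strip c
      if s = "" then none else some s

lemma pv_go_no_sep (sep : List Char) :
    ∀ (fuel : Nat) (l cur : List Char) (acc : List (List Char)) (m : Nat),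
      ¬ sep <:+: l → l.length < fuel →
      PySem.Chars.splitOnMax.go sep fuel m l cur acc = ((cur.reverse ++ l) :: acc).reverse := by
  intro fuel
  induction fuel with
  | zero => intro l cur acc m _ h; omega
  | succ f ih =>
    intro l cur acc m hinf hlen
    cases l with
    | nil => simp [PySem.Chars.splitOnMax.go]
    | cons c rest =>
      by_cases hm : m = 0
      · subst hm; simp [PySem.Chars.splitOnMax.go]
      · have hpre : sep.isPrefixOf (c :: rest) = false := by
          by_contra h
          exact hinf (List.IsPrefix.isInfix (List.isPrefixOf_iff_prefix.mp (by simpa using h)))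
        have hrest : ¬ sep <:+: rest := fun h => hinf (h.trans (List.suffix_cons c rest).isInfix)
        rw [show PySem.Chars.splitOnMax.go sep (f+1) m (c :: rest) cur acc
              = PySem.Chars.splitOnMax.go sep f m rest (c :: cur) acc from by
            simp [PySem.Chars.splitOnMax.go, hm, hpre]]
        rw [ih rest (c :: cur) acc m hrest (by simpa using Nat.lt_of_succ_lt_succ hlen)]
        simp

lemma pvSplitHead_of_no_dot (s : String) (h : PySem.Str.isIn "." s = false) :
    pvSplitHead s = s := by
  have hinf : ¬ ['.'] <:+: s.toList :=
    (PySem.Chars.isIn_eq_false_iff ['.'] s.toList).mp (by simpa using h)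
  have hgo := pv_go_no_sep ['.'] (s.length + 1) s.toList [] [] 1 hinf (by simp)
  unfold pvSplitHead
  simp only [PySem.Str.splitMax?, PySem.Chars.splitMax?, PySem.Chars.splitOnMax]
  simp [hgo]

-- A's loop result, characterised through the cleaned list
lemma pv_loopA (l : List (Option String)) (t u : List String) :
    l.foldl
      (fun (st : List String × List String) category =>
        match category with
        | none => st
        | some c =>
          if c = "" then st
          else
            let category_str := PySem.Str.strip c
            if category_str = "" then st
            else if PySem.Str.isIn "." category_str then
              (st.1 ++ [pvSplitHead category_str], st.2 ++ [category_str])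
            else
              (st.1 ++ [category_str], st.2))
      (t, u)
    = (t ++ (l.filterMap pvCleanOne).map pvSplitHead,
       u ++ (l.filterMap pvCleanOne).filter (fun s => PySem.Str.isIn "." s)) := by
  induction l generalizing t u with
  | nil => simp
  | cons c rest ih =>
    cases c with
    | none => simpa [pvCleanOne] using ih t u
    | some s =>
      by_cases h0 : s = ""
      · simpa [pvCleanOne, h0] using ih t u
      · by_cases h1 : PySem.Str.strip s = ""
        · simpa [pvCleanOne, h0, h1] using ih t u
        · by_cases h2 : PySem.Str.isIn "." (PySem.Str.strip s) = true
          · have h2' : PySem.Chars.isIn ['.'] (PySem.Chars.strip s.toList) = true := by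
              simpa using h2
            simp only [List.foldl_cons, h0, h1, h2, if_false, pvCleanOne]
            rw [ih]
            simp [pvCleanOne, h0, h1, h2']
          · have h2' : PySem.Chars.isIn ['.'] (PySem.Chars.strip s.toList) = false := by
              simpa using (eq_false_of_ne_true h2)
            simp only [List.foldl_cons, h0, h1, h2, if_false, pvCleanOne]
            rw [ih]
            simp [pvCleanOne, h0, h1, h2',
              pvSplitHead_of_no_dot (PySem.Str.strip s) (by simpa using (eq_false_of_ne_true h2))]

-- Set.ofList through an accumulator: new elements of l are appended after acc
lemma pv_foldl_add (l : List String) : ∀ acc : List String,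
    List.foldl PySem.Set.add acc l
      = acc ++ (List.foldl PySem.Set.add ([] : List String) l).filter
                 (fun x => !acc.contains x) := by
  induction l with
  | nil => intro acc; simp
  | cons x rest ih =>
    intro acc
    have hadd0 : List.foldl PySem.Set.add ([] : List String) (x :: rest)
        = List.foldl PySem.Set.add [x] rest := by
      simp [PySem.Set.add, PySem.Set.contains]
    rw [List.foldl_cons, ih (PySem.Set.add acc x), hadd0, ih [x]]
    by_cases hmem : x ∈ acc
    · have hax : PySem.Set.add acc x = acc := by
        simp [PySem.Set.add, PySem.Set.contains, hmem]
      rw [hax]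
      simp only [List.filter_append, List.filter_filter]
      have h1 : List.filter (fun y => !acc.contains y) [x] = [] := by
        simp [hmem]
      rw [h1, List.nil_append]
      congr 1
      apply List.filter_congr
      intro y _
      by_cases hy : y ∈ acc <;> by_cases hyx : y = x <;> simp [hy, hyx, hmem]
    · have hax : PySem.Set.add acc x = acc ++ [x] := by
        simp [PySem.Set.add, PySem.Set.contains, hmem]
      rw [hax]
      simp only [List.filter_append, List.filter_filter]
      have h1 : List.filter (fun y => !acc.contains y) [x] = [x] := by
        simp [hmem]
      rw [h1, List.append_assoc]
      congr 2
      apply List.filter_congr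
      intro y _
      by_cases hy : y ∈ acc <;> by_cases hyx : y = x <;> simp [hy, hyx]

-- first-occurrence dedup satisfies the prepend-and-remove recurrence B uses
lemma pv_dedup_cons (a : String) (l : List String) :
    PySem.Set.ofList (a :: l) = a :: (PySem.Set.ofList l).filter (fun x => x != a) := by
  have h1 : PySem.Set.ofList (a :: l) = List.foldl PySem.Set.add [a] l := by
    simp [PySem.Set.ofList, PySem.Set.add, PySem.Set.contains]
  have h2 : PySem.Set.ofList l = List.foldl PySem.Set.add ([] : List String) l := by
    simp [PySem.Set.ofList]
  rw [h1, pv_foldl_add l [a], h2]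
  simp only [List.singleton_append, List.cons.injEq, true_and]
  apply List.filter_congr
  intro y _
  by_cases hy : y = a <;> simp [hy]

-- B's reverse loop, as a foldr over the original list, equals dedup of A's two streams
lemma pv_loopB (l : List (Option String)) :
    l.reverse.foldl
      (fun (st : List String × List String) category =>
        let s := match category with
                 | none => ""
                 | some c => if c = "" then "" else PySem.Str.strip c
        if s = "" then st
        else if PySem.Str.isIn "." s then
          let t := pvSplitHead s
          (t :: st.1.filter (fun x => x != t), s :: st.2.filter (fun x => x != s))
        else
          (s :: st.1.filter (fun x => x != s), st.2))
      ([], [])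
    = (PySem.List.dedup ((l.filterMap pvCleanOne).map pvSplitHead),
       PySem.List.dedup ((l.filterMap pvCleanOne).filter (fun s => PySem.Str.isIn "." s))) := by
  rw [List.foldl_reverse]
  induction l with
  | nil => simp [PySem.List.dedup, PySem.Set.ofList]
  | cons c rest ih =>
    rw [List.foldr_cons, ih]
    cases c with
    | none => simp [pvCleanOne]
    | some s =>
      by_cases h0 : s = ""
      · simp [pvCleanOne, h0]
      · by_cases h1 : PySem.Str.strip s = ""
        · simp [pvCleanOne, h0, h1]
        · by_cases h2 : PySem.Str.isIn "." (PySem.Str.strip s) = true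
          · have h2' : PySem.Chars.isIn ['.'] (PySem.Chars.strip s.toList) = true := by
              simpa using h2
            simp [pvCleanOne, h0, h1, h2', pv_dedup_cons]
          · have h2'' := eq_false_of_ne_true h2
            have h2' : PySem.Chars.isIn ['.'] (PySem.Chars.strip s.toList) = false := by
              simpa using h2''
            simp [pvCleanOne, h0, h1, h2', pv_dedup_cons,
              pvSplitHead_of_no_dot (PySem.Str.strip s) h2'']

-- ===== VERDICT (by name: the statement is the Claim_ definition above) =====
theorem split_category_filters_spec : Claim_equal_split_category_filters := by
  intro wc _
  unfold Spec_split_category_filters split_category_filters split_category_filters_alt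
  rw [pv_loopA, pv_loopB]
  simp
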